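-- pv_equiv track=rewrite | github.com/melonlay/leetcode-codebase | problems/3518_smallest_palindromic_rearrangement_ii/solution.py | nCr_capped
-- ===== SOURCE A (Python) =====
-- def nCr_capped(N, k, limit):
--     # Standard base cases and symmetry property for combinations
--     if k < 0 or k > N:
--         return 0
--     if k == 0 or k == N:
--         return 1
--     if k > N // 2:
--         k = N - k
--
--     # Optimization for k=1
--     if k == 1:
--         # C(N, 1) = N. Return N if N <= limit, otherwise limit + 1.
--         # Using min ensures we don't return a value > limit + 1.
--         # Note: If limit itself is very large, N could exceed it.
--         return N if N <= limit else limit + 1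
--
--     res = 1
--     for i in range(k):
--         # Calculate res = res * (N - i) // (i + 1) iteratively.
--         # Python's arbitrary precision integers handle large intermediate values.
--         # We check if the result exceeds the limit after each step.
--
--         # Direct computation using Python's arbitrary precision integers
--         # Check for potential overflow BEFORE multiplication if limit is near maxint
--         # In Python 3, integers have arbitrary precision, overflow is less of a concern
--         # unless memory runs out or operations become extremely slow.
--         # Check if res * (N - i) might realistically exceed limits if 'limit' is huge.
--         # For typical limits like 10^6, 10^9, this is fine.
--
--         numerator_product = res * (N - i)
--         # Check before division if intermediate product itself exceeds limit in a significant way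
--         # This check might be overly conservative but prevents massive intermediate numbers if N, k are large
--         # if numerator_product // (i + 1) > limit: # Approximate check
--         #     return limit + 1
--
--         res = numerator_product // (i + 1)
--
--         # Check if the result exceeds the limit
--         if res > limit:
--             # Return limit + 1 to signify that the actual value is greater than limit.
--             return limit + 1
--
--     # If loop completes without exceeding limit, return the computed result.
--     # Final check just in case (should be redundant if check inside loop is correct)
--     # return res if res <= limit else limit + 1
--     return res
-- ===== SOURCE B (Python) =====
-- def _prod_range(lo, hi):
--     """Product of the integers lo..hi inclusive, by recursive halving."""
--     if lo > hi:
--         return 1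
--     if lo == hi:
--         return lo
--     mid = (lo + hi) // 2
--     return _prod_range(lo, mid) * _prod_range(mid + 1, hi)
--
--
-- def nCr_capped(N, k, limit):
--     if k < 0 or k > N:
--         return 0
--     if k == 0 or k == N:
--         return 1
--     j = k if k <= N - k else N - k
--     # For 1 <= j <= N//2 we have C(N, j) >= 2**j, so the cap is certainly
--     # exceeded as soon as j reaches the bit length of limit: no loop needed.
--     if limit <= 0 or j >= limit.bit_length():
--         return limit + 1
--     # Here j < bit_length(limit): compute C(N, j) exactly with two
--     # divide-and-conquer products and a single division, then cap.
--     c = _prod_range(N - j + 1, N) // _prod_range(1, j)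
--     return c if c <= limit else limit + 1
-- ===== Notes on version B (the rewrite author's own statement) =====
-- stated objective: alternative
-- what changed: B removes A's early-exit multiply/divide loop entirely: it decides the cap up front from the bound C(N,j) >= 2^j (for 1 <= j <= N/2) by comparing j with limit.bit_length(), and otherwise computes C(N,j) exactly with two recursive divide-and-conquer products and a single division, capping once at the end.
import Mathlib
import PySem

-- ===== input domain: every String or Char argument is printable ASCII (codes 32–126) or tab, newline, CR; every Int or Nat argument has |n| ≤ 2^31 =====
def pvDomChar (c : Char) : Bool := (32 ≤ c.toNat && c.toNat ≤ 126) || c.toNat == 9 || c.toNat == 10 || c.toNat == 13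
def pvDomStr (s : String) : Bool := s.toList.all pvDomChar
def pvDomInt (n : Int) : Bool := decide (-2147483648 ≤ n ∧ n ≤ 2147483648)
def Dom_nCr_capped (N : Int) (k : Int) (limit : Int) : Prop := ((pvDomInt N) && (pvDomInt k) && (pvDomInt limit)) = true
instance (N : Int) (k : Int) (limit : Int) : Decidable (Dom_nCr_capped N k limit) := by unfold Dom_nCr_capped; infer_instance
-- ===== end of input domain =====

-- B replaces A's early-exit multiply/divide loop by an up-front bit-length test (using C(N,j) ≥ 2^j)
-- plus two recursive divide-and-conquer products and one division (objective: alternative).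

-- ===== PORT A =====
-- the 'for i in range(k)' loop with its early 'return limit + 1'
def nCrLoopA (N limit : Int) : List Int → Int → Int
  | [], res => res
  | i :: rest, res =>
    let numerator_product := res * (N - i)
    let res' := PySem.Int.floordiv numerator_product (i + 1)
    if res' > limit then limit + 1 else nCrLoopA N limit rest res'

def nCr_capped (N : Int) (k : Int) (limit : Int) : Int :=
  if k < 0 ∨ k > N then 0
  else if k = 0 ∨ k = N then 1
  else
    let k1 := if k > PySem.Int.floordiv N 2 then N - k else k
    if k1 = 1 then (if N ≤ limit then N else limit + 1)
    else nCrLoopA N limit (PySem.List.pyRange 0 k1 1) 1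

-- ===== PORT B =====
-- B's _prod_range: product of lo..hi inclusive by recursive halving
def pvProdRange (lo hi : Int) : Int :=
  if lo > hi then 1
  else if lo = hi then lo
  else
    let mid := PySem.Int.floordiv (lo + hi) 2
    pvProdRange lo mid * pvProdRange (mid + 1) hi
termination_by (hi - lo).toNat
decreasing_by
  all_goals
    have h : PySem.Int.floordiv (lo + hi) 2 = (lo + hi) / 2 :=
      PySem.Int.floordiv_eq_ediv_of_pos (by norm_num)
    omega

def nCr_capped_alt (N : Int) (k : Int) (limit : Int) : Int :=
  if k < 0 ∨ k > N then 0
  else if k = 0 ∨ k = N then 1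
  else
    let j := if k ≤ N - k then k else N - k
    if limit ≤ 0 ∨ j ≥ (PySem.Int.bitLength limit : Int) then limit + 1
    else
      let c := PySem.Int.floordiv (pvProdRange (N - j + 1) N) (pvProdRange 1 j)
      if c ≤ limit then c else limit + 1

-- ===== PRECONDITION & SPEC =====
def Spec_nCr_capped (N : Int) (k : Int) (limit : Int) (out : Int) : Prop := out = nCr_capped_alt N k limit
instance (N : Int) (k : Int) (limit : Int) (out : Int) : Decidable (Spec_nCr_capped N k limit out) := by unfold Spec_nCr_capped; infer_instance

-- ===== CLAIM (what is proved, stated in full; the proofs are below) =====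
def Claim_equal_nCr_capped : Prop := ∀ (N : Int) (k : Int) (limit : Int), Dom_nCr_capped N k limit → Spec_nCr_capped N k limit (nCr_capped N k limit)

-- ===== LEMMAS AND PROOFS =====

-- binomial coefficients grow up to the middle
theorem pv_choose_mono_half (n : Nat) : ∀ (b a : Nat), a ≤ b → 2 * b ≤ n →
    n.choose a ≤ n.choose b := by
  intro b
  induction b with
  | zero => intro a ha _; have : a = 0 := by omega
            simp [this]
  | succ b ih =>
    intro a ha h2
    rcases Nat.lt_or_ge a (b + 1) with h | h
    · have hb : n.choose b ≤ n.choose (b + 1) :=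
        Nat.choose_le_succ_of_lt_half_left (by omega)
      exact le_trans (ih a (by omega) (by omega)) hb
    · have : a = b + 1 := by omega
      simp [this]

-- A's loop invariant: starting at res = C(n,j) with the remaining indices [j, j+m),
-- the loop computes C(n,kk) capped at limit.
theorem pv_loopA_inv (N limit : Int) (n kk : Nat) (hN : N = (n : Int))
    (hkk : 1 ≤ kk) (h2 : 2 * kk ≤ n) :
    ∀ (m j : Nat), j + m = kk → (j = 0 ∨ ((n.choose j : Int) ≤ limit)) →
    nCrLoopA N limit ((List.range' j m).map (Nat.cast : Nat → Int)) ((n.choose j : Int)) =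
      if ((n.choose kk : Int)) ≤ limit then (n.choose kk : Int) else limit + 1 := by
  intro m
  induction m with
  | zero =>
    intro j hj hres
    have hjk : j = kk := by omega
    subst hjk
    rcases hres with h | h
    · omega
    · rw [List.range'_zero, List.map_nil]
      simp only [nCrLoopA]
      rw [if_pos h]
  | succ m ih =>
    intro j hj hres
    have hjlt : j < kk := by omega
    have hjn : j < n := by omega
    rw [List.range'_succ]
    simp only [List.map_cons, nCrLoopA]
    have hsub : N - (j : Int) = ((n - j : Nat) : Int) := by
      rw [hN]; push_cast [Nat.cast_sub (by omega : j ≤ n)]; ring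
    have hjp : ((j : Int) + 1) = ((j + 1 : Nat) : Int) := by push_cast; ring
    have hprod : ((n.choose j : Int)) * (N - (j : Int)) =
        ((n.choose (j + 1) * (j + 1) : Nat) : Int) := by
      rw [hsub, Nat.choose_succ_right_eq]; push_cast; ring
    have hres' : PySem.Int.floordiv ((n.choose j : Int) * (N - (j : Int))) ((j : Int) + 1)
        = (n.choose (j + 1) : Int) := by
      rw [hprod, hjp, PySem.Int.floordiv_natCast]
      rw [Nat.mul_div_cancel _ (by omega : 0 < j + 1)]
    rw [hres']
    by_cases hgt : (n.choose (j + 1) : Int) > limit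
    · rw [if_pos hgt]
      have hmono : n.choose (j + 1) ≤ n.choose kk :=
        pv_choose_mono_half n kk (j + 1) (by omega) h2
      have : ¬ ((n.choose kk : Int) ≤ limit) := by
        have : (n.choose (j + 1) : Int) ≤ (n.choose kk : Int) := by exact_mod_cast hmono
        omega
      rw [if_neg this]
    · rw [if_neg hgt]
      exact ih (j + 1) (by omega) (Or.inr (by omega))

-- A's loop (index range 0..kk-1, res = 1) computes the capped value of C(n,kk).
theorem pv_A_core (N limit : Int) (n kk : Nat) (hN : N = (n : Int))
    (hkk : 1 ≤ kk) (h2 : 2 * kk ≤ n) :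
    nCrLoopA N limit (PySem.List.pyRange 0 (kk : Int) 1) 1 =
      if ((n.choose kk : Int)) ≤ limit then (n.choose kk : Int) else limit + 1 := by
  have hr : PySem.List.pyRange 0 (kk : Int) 1 = (List.range' 0 kk).map (Nat.cast : Nat → Int) := by
    rw [PySem.List.pyRange_one]
    rw [show ((kk : Int) - 0).toNat = kk by omega]
    rw [List.range_eq_range']
    apply List.map_congr_left
    intro x _
    simp
  rw [hr]
  have h := pv_loopA_inv N limit n kk hN hkk h2 kk 0 (by omega) (Or.inl rfl)
  rw [Nat.choose_zero_right, Nat.cast_one] at h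
  exact h

-- pvProdRange lo hi = hi * (hi-1) * ... * lo, as a descending factorial (1 ≤ lo ≤ hi)
theorem pv_prodRange_eq (fuel : Nat) : ∀ (lo hi : Int), (hi - lo).toNat ≤ fuel → 1 ≤ lo → lo ≤ hi →
    pvProdRange lo hi = ((hi.toNat.descFactorial (hi - lo + 1).toNat : Nat) : Int) := by
  induction fuel with
  | zero =>
    intro lo hi hf h1 hlh
    have : lo = hi := by omega
    subst this
    rw [pvProdRange]
    rw [if_neg (by omega), if_pos rfl]
    rw [show (lo - lo + 1).toNat = 1 by omega]
    rw [Nat.descFactorial_succ, Nat.descFactorial_zero]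
    omega
  | succ fuel ih =>
    intro lo hi hf h1 hlh
    rcases eq_or_lt_of_le hlh with heq | hlt
    · subst heq
      rw [pvProdRange]
      rw [if_neg (by omega), if_pos rfl]
      rw [show (lo - lo + 1).toNat = 1 by omega]
      rw [Nat.descFactorial_succ, Nat.descFactorial_zero]
      omega
    · rw [pvProdRange]
      rw [if_neg (by omega)]
      rw [if_neg (by omega)]
      have hmid : PySem.Int.floordiv (lo + hi) 2 = (lo + hi) / 2 :=
        PySem.Int.floordiv_eq_ediv_of_pos (by norm_num)
      set mid := PySem.Int.floordiv (lo + hi) 2 with hmiddef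
      have hbounds : lo ≤ mid ∧ mid < hi := by omega
      dsimp only
      have hl : pvProdRange lo mid = ((mid.toNat.descFactorial (mid - lo + 1).toNat : Nat) : Int) :=
        ih lo mid (by omega) h1 (by omega)
      have hr : pvProdRange (mid + 1) hi = ((hi.toNat.descFactorial (hi - mid).toNat : Nat) : Int) := by
        have := ih (mid + 1) hi (by omega) (by omega) (by omega)
        rw [show hi - (mid + 1) + 1 = hi - mid by ring] at this
        exact this
      rw [hl, hr]
      -- descFactorial split: hi↓(hi-mid) * mid↓(mid-lo+1) = hi↓(hi-lo+1)
      have hsplit : ∀ (n a b : Nat), a + b ≤ n →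
          n.descFactorial a * (n - a).descFactorial b = n.descFactorial (a + b) := by
        intro n a b
        induction b with
        | zero => intro _; simp
        | succ b ihb =>
          intro hab
          rw [show a + (b + 1) = (a + b) + 1 by ring, Nat.descFactorial_succ,
            Nat.descFactorial_succ, ← ihb (by omega)]
          rw [show n - a - b = n - (a + b) by omega]
          ring
      have hmn : mid.toNat = hi.toNat - (hi - mid).toNat := by omega
      have := hsplit hi.toNat (hi - mid).toNat (mid - lo + 1).toNat (by omega)
      rw [← hmn] at this
      rw [show (hi - mid).toNat + (mid - lo + 1).toNat = (hi - lo + 1).toNat by omega] at this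
      exact_mod_cast congrArg (Nat.cast : Nat → Int) ((mul_comm _ _).trans this)

-- 2^j ≤ C(2j, j)
theorem pv_two_pow_le_central (j : Nat) : 2 ^ j ≤ (2 * j).choose j := by
  induction j with
  | zero => simp
  | succ j ih =>
    have h1 : (2 * j).choose j ≤ (2 * j + 1).choose j := Nat.choose_le_choose j (by omega)
    have h2 : (2 * j).choose j ≤ (2 * j + 1).choose (j + 1) := by
      rw [Nat.choose_succ_succ]
      omega
    have hp : (2 * (j + 1)).choose (j + 1) = (2 * j + 1).choose j + (2 * j + 1).choose (j + 1) := by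
      rw [show 2 * (j + 1) = (2 * j + 1) + 1 by ring]
      exact Nat.choose_succ_succ (2 * j + 1) j
    calc 2 ^ (j + 1) = 2 ^ j + 2 ^ j := by ring
    _ ≤ (2 * j).choose j + (2 * j).choose j := by omega
    _ ≤ (2 * j + 1).choose j + (2 * j + 1).choose (j + 1) := by omega
    _ = (2 * (j + 1)).choose (j + 1) := hp.symm

-- 2^j ≤ C(n, j) for 2j ≤ n
theorem pv_two_pow_le_choose (n j : Nat) (h2 : 2 * j ≤ n) : 2 ^ j ≤ n.choose j :=
  le_trans (pv_two_pow_le_central j) (Nat.choose_le_choose j (by omega))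

-- B's guard is exactly 'limit < 2^j' (for j ≥ 1)
theorem pv_guard_iff (limit : Int) (j : Nat) :
    (limit ≤ 0 ∨ (j : Int) ≥ (PySem.Int.bitLength limit : Int)) ↔ limit < 2 ^ j := by
  constructor
  · rintro (h | h)
    · have : (0 : Int) < 2 ^ j := by positivity
      omega
    · by_cases h0 : limit ≤ 0
      · have : (0 : Int) < 2 ^ j := by positivity
        omega
      · push Not at h0
        have hlt := PySem.Int.lt_two_pow_bitLength limit
        have hle : (limit.natAbs : Int) < ((2 ^ PySem.Int.bitLength limit : Nat) : Int) := by
          exact_mod_cast hlt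
        have hmono : ((2 ^ PySem.Int.bitLength limit : Nat) : Int) ≤ ((2 ^ j : Nat) : Int) := by
          exact_mod_cast Nat.pow_le_pow_right (by omega) (by exact_mod_cast h)
        have : limit = (limit.natAbs : Int) := by omega
        push_cast at hle hmono
        rw [abs_of_pos h0] at hle
        linarith
  · intro h
    by_cases h0 : limit ≤ 0
    · exact Or.inl h0
    · push Not at h0
      right
      by_contra hc
      push Not at hc
      have hbl : j < PySem.Int.bitLength limit := by exact_mod_cast hc
      have hlow := PySem.Int.two_pow_bitLength_le limit (by omega)
      have hle : 2 ^ j ≤ 2 ^ (PySem.Int.bitLength limit - 1) :=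
        Nat.pow_le_pow_right (by omega) (by omega)
      have : ((2 ^ j : Nat) : Int) ≤ (limit.natAbs : Int) := by
        exact_mod_cast le_trans hle hlow
      have habs : (limit.natAbs : Int) = limit := by omega
      push_cast at this
      rw [abs_of_pos h0] at this
      linarith

-- B's exact branch computes C(n, j)
theorem pv_B_exact (N : Int) (n j : Nat) (hN : N = (n : Int)) (hj : 1 ≤ j) (h2 : 2 * j ≤ n) :
    PySem.Int.floordiv (pvProdRange (N - (j : Int) + 1) N) (pvProdRange 1 (j : Int))
      = (n.choose j : Int) := by
  have hnum : pvProdRange (N - (j : Int) + 1) N = ((n.descFactorial j : Nat) : Int) := by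
    have := pv_prodRange_eq (N - (N - (j : Int) + 1)).toNat (N - (j : Int) + 1) N
      (le_refl _) (by omega) (by omega)
    rw [this]
    rw [show N.toNat = n by omega]
    rw [show (N - (N - (j : Int) + 1) + 1).toNat = j by omega]
  have hden : pvProdRange 1 (j : Int) = ((j.factorial : Nat) : Int) := by
    have := pv_prodRange_eq ((j : Int) - 1).toNat 1 (j : Int) (le_refl _) (le_refl _) (by omega)
    rw [this]
    rw [show ((j : Int) - 1 + 1).toNat = j by omega, show (j : Int).toNat = j by omega]
    rw [Nat.descFactorial_self]
  rw [hnum, hden, PySem.Int.floordiv_natCast]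
  rw [← Nat.choose_eq_descFactorial_div_factorial]

-- ===== VERDICT (by name: the statement is the Claim_ definition above) =====
theorem nCr_capped_spec : Claim_equal_nCr_capped := by
  intro N k limit _
  unfold Spec_nCr_capped nCr_capped nCr_capped_alt
  by_cases hg1 : k < 0 ∨ k > N
  · rw [if_pos hg1, if_pos hg1]
  · rw [if_neg hg1, if_neg hg1]
    by_cases hg2 : k = 0 ∨ k = N
    · rw [if_pos hg2, if_pos hg2]
    · rw [if_neg hg2, if_neg hg2]
      have hk1 : 1 ≤ k := by omega
      have hkN : k ≤ N - 1 := by omega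
      have hN2 : 2 ≤ N := by omega
      -- the two fold guards pick the same folded k
      have hfd : PySem.Int.floordiv N 2 = N / 2 :=
        PySem.Int.floordiv_eq_ediv_of_pos (by norm_num)
      have hveq : (if k > PySem.Int.floordiv N 2 then N - k else k)
          = (if k ≤ N - k then k else N - k) := by
        by_cases hc : k ≤ N - k
        · rw [if_pos hc, if_neg (by rw [hfd]; omega : ¬ k > PySem.Int.floordiv N 2)]
        · rw [if_neg hc, if_pos (by rw [hfd]; omega : k > PySem.Int.floordiv N 2)]
      rw [hveq]
      set k1 : Int := if k ≤ N - k then k else N - k with hk1def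
      have hk1lb : 1 ≤ k1 := by rw [hk1def]; split <;> omega
      have hk1ub : 2 * k1 ≤ N := by rw [hk1def]; split <;> omega
      -- move to naturals
      obtain ⟨n, hn⟩ : ∃ n : Nat, N = (n : Int) := ⟨N.toNat, by omega⟩
      obtain ⟨kk, hkk⟩ : ∃ kk : Nat, k1 = (kk : Int) := ⟨k1.toNat, by omega⟩
      have hkk1 : 1 ≤ kk := by omega
      have hkk2 : 2 * kk ≤ n := by omega
      rw [hkk]
      dsimp only
      -- B's value is the capped C(n,kk)
      have hBval : (if limit ≤ 0 ∨ (kk : Int) ≥ (PySem.Int.bitLength limit : Int) then limit + 1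
          else
            let c := PySem.Int.floordiv (pvProdRange (N - (kk : Int) + 1) N) (pvProdRange 1 (kk : Int))
            if c ≤ limit then c else limit + 1)
          = if ((n.choose kk : Int)) ≤ limit then (n.choose kk : Int) else limit + 1 := by
        by_cases hguard : limit ≤ 0 ∨ (kk : Int) ≥ (PySem.Int.bitLength limit : Int)
        · rw [if_pos hguard]
          have hlt : limit < 2 ^ kk := (pv_guard_iff limit kk).mp hguard
          have hge : ((2 ^ kk : Nat) : Int) ≤ (n.choose kk : Int) := by
            exact_mod_cast pv_two_pow_le_choose n kk hkk2
          push_cast at hge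
          rw [if_neg (by omega)]
        · rw [if_neg hguard]
          dsimp only
          rw [pv_B_exact N n kk hn hkk1 hkk2]
      rw [hBval]
      by_cases hone : (kk : Int) = 1
      · have : kk = 1 := by omega
        subst this
        rw [if_pos hone]
        rw [Nat.choose_one_right, ← hn]
      · rw [if_neg hone]
        exact pv_A_core N limit n kk hn hkk1 hkk2
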